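-- pv_equiv track=rewrite | github.com/0xfnzero/sol-parser-sdk-python | sol_parser/env_config.py | _parse_grpc_cli
-- ===== SOURCE A (Python) =====
-- from typing import Optional, Sequence, Tuple
--
-- def _parse_grpc_cli(argv: Sequence[str]) -> tuple[Optional[str], Optional[str]]:
--     """Parse ``--grpc-url``, ``--grpc-token``, and short aliases from *argv*."""
--     url: Optional[str] = None
--     token: Optional[str] = None
--     i = 0
--     n = len(argv)
--     while i < n:
--         a = argv[i]
--         if a in ("--grpc-url", "--grpc-endpoint", "-g") and i + 1 < n:
--             url = argv[i + 1].strip()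
--             i += 2
--             continue
--         if a.startswith("--grpc-url="):
--             url = a.split("=", 1)[1].strip()
--             i += 1
--             continue
--         if a.startswith("--grpc-endpoint="):
--             url = a.split("=", 1)[1].strip()
--             i += 1
--             continue
--         if a in ("--grpc-token", "--token", "-t") and i + 1 < n:
--             token = argv[i + 1].strip()
--             i += 2
--             continue
--         if a.startswith("--grpc-token="):
--             token = a.split("=", 1)[1].strip()
--             i += 1
--             continue
--         if a.startswith("--token="):
--             token = a.split("=", 1)[1].strip()
--             i += 1
--             continue
--         i += 1
--     return url, token
-- ===== SOURCE B (Python) =====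
-- from typing import Optional, Sequence, Tuple
--
-- def _parse_grpc_cli(argv: Sequence[str]) -> tuple[Optional[str], Optional[str]]:
--     """Single-pass state machine: a 'pending' flag remembers that the previous
--     token was a bare value-expecting option; no index arithmetic / lookahead."""
--     url: Optional[str] = None
--     token: Optional[str] = None
--     pending: Optional[str] = None  # 'u' -> next token is the url, 't' -> the token
--     for a in argv:
--         if pending == 'u':
--             url = a.strip()
--             pending = None
--         elif pending == 't':
--             token = a.strip()
--             pending = None
--         elif a.startswith("--grpc-url=") or a.startswith("--grpc-endpoint="):
--             url = a.split("=", 1)[1].strip()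
--         elif a.startswith("--grpc-token=") or a.startswith("--token="):
--             token = a.split("=", 1)[1].strip()
--         elif a in ("--grpc-url", "--grpc-endpoint", "-g"):
--             pending = 'u'
--         elif a in ("--grpc-token", "--token", "-t"):
--             pending = 't'
--         # anything else is ignored
--     return url, token
-- ===== Notes on version B (the rewrite author's own statement) =====
-- stated objective: simpler
-- what changed: Replaced the index-based while loop with i+1 lookahead and manual i+=2 skips by a single plain for-loop state machine that carries a 'pending' flag for a bare option awaiting its value.
import Mathlib
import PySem

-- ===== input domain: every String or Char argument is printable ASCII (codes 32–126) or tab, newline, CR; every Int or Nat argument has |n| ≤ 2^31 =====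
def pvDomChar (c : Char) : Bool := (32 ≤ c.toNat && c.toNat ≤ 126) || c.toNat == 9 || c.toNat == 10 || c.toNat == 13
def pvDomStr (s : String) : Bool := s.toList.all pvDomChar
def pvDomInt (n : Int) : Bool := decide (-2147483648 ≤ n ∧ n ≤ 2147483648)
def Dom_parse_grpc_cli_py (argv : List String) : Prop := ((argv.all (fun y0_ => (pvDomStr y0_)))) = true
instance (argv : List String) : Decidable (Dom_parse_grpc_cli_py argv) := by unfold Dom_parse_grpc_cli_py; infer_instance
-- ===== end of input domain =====

-- B replaces A's index/lookahead while-loop by a single-pass 'pending'-flag state machine (objective: simpler).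


-- ===== PORT A =====
-- shared helper for the expression a.split("=", 1)[1] that BOTH Pythons contain
-- (exact whenever "=" occurs in a, which every call site guarantees via startswith "…=")
def splitEq1 (a : String) : String :=
  match PySem.Str.splitMax? a "=" 1 with
  | some (_ :: v :: _) => v
  | _ => ""

-- A's 'while i < n' with argv[i]/argv[i+1] lookahead, rendered as structural recursion on
-- the remaining suffix argv.drop i (so 'i + 1 < n' becomes 'the suffix has a second element');
-- branches in A's order, state (url, token) carried through.
def goA : List String → Option String → Option String → Option String × Option String
  | [], url, token => (url, token)
  | a :: rest, url, token =>
    if (a == "--grpc-url" || a == "--grpc-endpoint" || a == "-g") && !rest.isEmpty then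
      match rest with
      | v :: rest' => goA rest' (some (PySem.Str.strip v)) token
      | [] => (url, token)  -- unreachable: guard requires rest ≠ []
    else if PySem.Str.startswith a "--grpc-url=" then
      goA rest (some (PySem.Str.strip (splitEq1 a))) token
    else if PySem.Str.startswith a "--grpc-endpoint=" then
      goA rest (some (PySem.Str.strip (splitEq1 a))) token
    else if (a == "--grpc-token" || a == "--token" || a == "-t") && !rest.isEmpty then
      match rest with
      | v :: rest' => goA rest' url (some (PySem.Str.strip v))
      | [] => (url, token)  -- unreachable: guard requires rest ≠ []
    else if PySem.Str.startswith a "--grpc-token=" then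
      goA rest url (some (PySem.Str.strip (splitEq1 a)))
    else if PySem.Str.startswith a "--token=" then
      goA rest url (some (PySem.Str.strip (splitEq1 a)))
    else
      goA rest url token

def parse_grpc_cli_py (argv : List String) : Option String × Option String :=
  goA argv none none

-- ===== PORT B =====
-- B's loop body: state (url, token, pending); pending = some "u"/"t" means the previous
-- token was a bare url-/token-expecting option.
def stepB (st : Option String × Option String × Option String) (a : String) :
    Option String × Option String × Option String :=
  let (url, token, pending) := st
  if pending == some "u" then (some (PySem.Str.strip a), token, none)
  else if pending == some "t" then (url, some (PySem.Str.strip a), none)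
  else if PySem.Str.startswith a "--grpc-url=" || PySem.Str.startswith a "--grpc-endpoint=" then
    (some (PySem.Str.strip (splitEq1 a)), token, pending)
  else if PySem.Str.startswith a "--grpc-token=" || PySem.Str.startswith a "--token=" then
    (url, some (PySem.Str.strip (splitEq1 a)), pending)
  else if a == "--grpc-url" || a == "--grpc-endpoint" || a == "-g" then
    (url, token, some "u")
  else if a == "--grpc-token" || a == "--token" || a == "-t" then
    (url, token, some "t")
  else (url, token, pending)

def parse_grpc_cli_py_alt (argv : List String) : Option String × Option String :=
  let (url, token, _) := argv.foldl stepB (none, none, none)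
  (url, token)

-- ===== PRECONDITION & SPEC =====
def Spec_parse_grpc_cli_py (argv : List String) (out : Option String × Option String) : Prop := out = parse_grpc_cli_py_alt argv
instance (argv : List String) (out : Option String × Option String) : Decidable (Spec_parse_grpc_cli_py argv out) := by unfold Spec_parse_grpc_cli_py; infer_instance

-- ===== CLAIM (what is proved, stated in full; the proofs are below) =====
def Claim_equal_parse_grpc_cli_py : Prop := ∀ (argv : List String), Dom_parse_grpc_cli_py argv → Spec_parse_grpc_cli_py argv (parse_grpc_cli_py argv)

-- ===== LEMMAS AND PROOFS =====

-- the projection B's function applies after the fold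
def projB (st : Option String × Option String × Option String) : Option String × Option String :=
  (st.1, st.2.1)

-- a bare url flag matches none of the other tests of either loop body
lemma urlFlag_props (a : String)
    (h : (a == "--grpc-url" || a == "--grpc-endpoint" || a == "-g") = true) :
    PySem.Str.startswith a "--grpc-url=" = false ∧
    PySem.Str.startswith a "--grpc-endpoint=" = false ∧
    PySem.Str.startswith a "--grpc-token=" = false ∧
    PySem.Str.startswith a "--token=" = false ∧
    (a == "--grpc-token" || a == "--token" || a == "-t") = false := by
  simp only [Bool.or_eq_true, beq_iff_eq] at h
  rcases h with (h | h) | h <;> subst h <;>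
    exact ⟨by decide, by decide, by decide, by decide, by decide⟩

-- a bare token flag matches none of the inline "…=" tests
lemma tokFlag_props (a : String)
    (h : (a == "--grpc-token" || a == "--token" || a == "-t") = true) :
    PySem.Str.startswith a "--grpc-token=" = false ∧
    PySem.Str.startswith a "--token=" = false := by
  simp only [Bool.or_eq_true, beq_iff_eq] at h
  rcases h with (h | h) | h <;> subst h <;> exact ⟨by decide, by decide⟩

lemma key : ∀ (N : Nat) (l : List String), l.length ≤ N → ∀ url token,
    goA l url token = projB (l.foldl stepB (url, token, none)) := by
  intro N
  induction N with
  | zero =>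
    intro l hl url token
    match l with
    | [] => simp [goA, projB]
  | succ N ih =>
    intro l hl url token
    match l with
    | [] => simp [goA, projB]
    | [a] =>
      by_cases hu : (a == "--grpc-url" || a == "--grpc-endpoint" || a == "-g") = true
      · obtain ⟨e1, e2, e3, e4, e5⟩ := urlFlag_props a hu
        simp at hu e1 e2 e3 e4 e5
        simp [goA, stepB, projB, hu, e1, e2, e3, e4]
      · by_cases h1 : PySem.Str.startswith a "--grpc-url=" = true
        · simp at h1
          simp [goA, stepB, projB, h1]
        · by_cases h2 : PySem.Str.startswith a "--grpc-endpoint=" = true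
          · simp at h1 h2
            simp [goA, stepB, projB, h1, h2]
          · by_cases ht : (a == "--grpc-token" || a == "--token" || a == "-t") = true
            · obtain ⟨f1, f2⟩ := tokFlag_props a ht
              simp at hu h1 h2 ht f1 f2
              simp [goA, stepB, projB, hu, h1, h2, ht, f1, f2]
            · by_cases h3 : PySem.Str.startswith a "--grpc-token=" = true
              · simp at h1 h2 h3
                simp [goA, stepB, projB, h1, h2, h3]
              · by_cases h4 : PySem.Str.startswith a "--token=" = true
                · simp at h1 h2 h3 h4
                  simp [goA, stepB, projB, h1, h2, h3, h4]
                · simp at hu h1 h2 ht h3 h4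
                  simp [goA, stepB, projB, hu, h1, h2, ht, h3, h4]
    | a :: v :: rest' =>
      have hlen1 : (v :: rest').length ≤ N := by simp at hl ⊢; omega
      have hlen2 : rest'.length ≤ N := by simp at hl; omega
      by_cases hu : (a == "--grpc-url" || a == "--grpc-endpoint" || a == "-g") = true
      · obtain ⟨e1, e2, e3, e4, e5⟩ := urlFlag_props a hu
        simp at hu e1 e2 e3 e4 e5
        have hA : goA (a :: v :: rest') url token
            = goA rest' (some (PySem.Str.strip v)) token := by
          simp [goA, hu]
        have hs1 : stepB (url, token, none) a = (url, token, some "u") := by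
          simp [stepB, hu, e1, e2, e3, e4]
        have hs2 : stepB (url, token, some "u") v
            = (some (PySem.Str.strip v), token, none) := by
          simp [stepB]
        rw [hA, ih rest' hlen2, List.foldl_cons, List.foldl_cons, hs1, hs2]
      · by_cases h1 : PySem.Str.startswith a "--grpc-url=" = true
        · simp at hu h1
          have hA : goA (a :: v :: rest') url token
              = goA (v :: rest') (some (PySem.Str.strip (splitEq1 a))) token := by
            simp [goA, hu, h1]
          have hs : stepB (url, token, none) a
              = (some (PySem.Str.strip (splitEq1 a)), token, none) := by
            simp [stepB, h1]
          rw [hA, ih (v :: rest') hlen1]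
          conv_rhs => rw [List.foldl_cons, hs]
        · by_cases h2 : PySem.Str.startswith a "--grpc-endpoint=" = true
          · simp at hu h1 h2
            have hA : goA (a :: v :: rest') url token
                = goA (v :: rest') (some (PySem.Str.strip (splitEq1 a))) token := by
              simp [goA, hu, h1, h2]
            have hs : stepB (url, token, none) a
                = (some (PySem.Str.strip (splitEq1 a)), token, none) := by
              simp [stepB, h1, h2]
            rw [hA, ih (v :: rest') hlen1]
            conv_rhs => rw [List.foldl_cons, hs]
          · by_cases ht : (a == "--grpc-token" || a == "--token" || a == "-t") = true
            · obtain ⟨f1, f2⟩ := tokFlag_props a ht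
              simp at hu h1 h2 ht f1 f2
              have hA : goA (a :: v :: rest') url token
                  = goA rest' url (some (PySem.Str.strip v)) := by
                simp [goA, hu, h1, h2, ht]
              have hs1 : stepB (url, token, none) a = (url, token, some "t") := by
                simp [stepB, hu, h1, h2, ht, f1, f2]
              have hs2 : stepB (url, token, some "t") v
                  = (url, some (PySem.Str.strip v), none) := by
                simp [stepB]
              rw [hA, ih rest' hlen2, List.foldl_cons, List.foldl_cons, hs1, hs2]
            · by_cases h3 : PySem.Str.startswith a "--grpc-token=" = true
              · simp at hu h1 h2 ht h3
                have hA : goA (a :: v :: rest') url token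
                    = goA (v :: rest') url (some (PySem.Str.strip (splitEq1 a))) := by
                  simp [goA, hu, h1, h2, ht, h3]
                have hs : stepB (url, token, none) a
                    = (url, some (PySem.Str.strip (splitEq1 a)), none) := by
                  simp [stepB, h1, h2, h3]
                rw [hA, ih (v :: rest') hlen1]
                conv_rhs => rw [List.foldl_cons, hs]
              · by_cases h4 : PySem.Str.startswith a "--token=" = true
                · simp at hu h1 h2 ht h3 h4
                  have hA : goA (a :: v :: rest') url token
                      = goA (v :: rest') url (some (PySem.Str.strip (splitEq1 a))) := by
                    simp [goA, hu, h1, h2, ht, h3, h4]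
                  have hs : stepB (url, token, none) a
                      = (url, some (PySem.Str.strip (splitEq1 a)), none) := by
                    simp [stepB, h1, h2, h3, h4]
                  rw [hA, ih (v :: rest') hlen1]
                  conv_rhs => rw [List.foldl_cons, hs]
                · simp at hu h1 h2 ht h3 h4
                  have hA : goA (a :: v :: rest') url token
                      = goA (v :: rest') url token := by
                    simp [goA, hu, h1, h2, ht, h3, h4]
                  have hs : stepB (url, token, none) a = (url, token, none) := by
                    simp [stepB, hu, h1, h2, ht, h3, h4]
                  rw [hA, ih (v :: rest') hlen1]
                  conv_rhs => rw [List.foldl_cons, hs]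

-- ===== VERDICT (by name: the statement is the Claim_ definition above) =====
theorem parse_grpc_cli_py_spec : Claim_equal_parse_grpc_cli_py := by
  intro argv _
  unfold Spec_parse_grpc_cli_py parse_grpc_cli_py parse_grpc_cli_py_alt
  rw [key argv.length argv le_rfl]
  rfl
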